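-- pv_equiv track=rewrite | github.com/pmettaprasert/proxyProject | proxy.py | add_length_and_cache_to_header
-- ===== SOURCE A (Python) =====
-- def add_length_and_cache_to_header(response, in_cache):
--     """
--     This method will add the Content-Length if it is not in the header
--     and add the Cache-Hit header if the response is in the cache.
--
--     Parameters
--     ----------
--     response : str
--         The response sent from the server.
--
--     in_cache : bool
--         True if the response is in the cache, False otherwise.
--
--     Returns
--     -------
--     response : str
--         The response with the Content-Length and Cache-Hit headers added.
--     """
--
--     response_split = response.split("\r\n")
--
--     # Keep track of the last line of the headers
--     last_line_of_headers = response_split.index("")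
--
--     # If the Content-Length is not in the header add a Content-Length
--     if not any("Content-Length" in line for line in
--                response_split[0:last_line_of_headers]):
--
--         content_length = 0
--
--         # Calculate the content length
--         for i in range(last_line_of_headers + 1, len(response_split)):
--             content_length += len(response_split[i])
--
--         response_split.insert(last_line_of_headers, "Content-Length: " +
--                               str(content_length))
--
--         last_line_of_headers += 1
--
--     # If Connection-Close is not in the header add a Connection-Close
--     if not any("Connection: close" in line for line in
--                  response_split[0:last_line_of_headers]):
--         response_split.insert(last_line_of_headers, "Connection: close")
--         last_line_of_headers += 1
--
--     # Add cache hit header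
--     if in_cache:
--         response_split.insert(last_line_of_headers, "Cache-Hit: 1")
--     else:
--         response_split.insert(last_line_of_headers, "Cache-Hit: 0")
--
--     # Reconstruct the response
--     response = ""
--
--     # Add the headers.
--     for line in response_split[0:last_line_of_headers + 1]:
--         response += line + "\r\n"
--
--     response += "\r\n"
--
--     # Attach the body
--     for line in response_split[last_line_of_headers + 1:]:
--         response += line
--
--     return response
-- ===== SOURCE B (Python) =====
-- def add_length_and_cache_to_header(response, in_cache):
--     """Single recursive pass over the CRLF-split lines: stream each header line
--     straight to the output while OR-ing 'already seen' flags, and emit the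
--     missing headers plus the body the moment the blank line is reached."""
--     def emit(parts, seen_cl, seen_conn):
--         line = parts[0]
--         if line == "":
--             body = "".join(parts[1:])
--             tail = ""
--             if not seen_cl:
--                 tail += "Content-Length: " + str(len(body)) + "\r\n"
--             if not seen_conn:
--                 tail += "Connection: close\r\n"
--             tail += ("Cache-Hit: 1" if in_cache else "Cache-Hit: 0") + "\r\n"
--             return tail + "\r\n" + body
--         return line + "\r\n" + emit(parts[1:],
--                                     seen_cl or "Content-Length" in line,
--                                     seen_conn or "Connection: close" in line)
--     return emit(response.split("\r\n"), False, False)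
-- ===== Notes on version B (the rewrite author's own statement) =====
-- stated objective: alternative
-- what changed: Replaces A's staged passes (find the blank-line index, two any() scans over header slices, three list.insert calls with a mutated index, then two reconstruction loops) by a single recursive forward pass that streams each header line straight to the output while OR-ing 'seen Content-Length'/'seen Connection: close' flags and emits the missing headers and body at the blank line.
import Mathlib
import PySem

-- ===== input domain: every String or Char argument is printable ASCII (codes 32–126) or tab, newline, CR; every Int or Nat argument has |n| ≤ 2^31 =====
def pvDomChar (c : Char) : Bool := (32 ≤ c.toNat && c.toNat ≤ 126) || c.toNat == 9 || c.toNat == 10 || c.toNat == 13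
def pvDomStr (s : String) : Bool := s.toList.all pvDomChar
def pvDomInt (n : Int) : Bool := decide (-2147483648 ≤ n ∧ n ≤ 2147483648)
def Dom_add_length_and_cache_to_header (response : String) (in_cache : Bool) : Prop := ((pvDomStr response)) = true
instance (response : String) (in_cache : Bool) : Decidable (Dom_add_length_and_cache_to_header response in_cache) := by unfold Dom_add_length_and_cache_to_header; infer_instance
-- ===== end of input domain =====

-- B replaces A's staged passes (blank-line index, any() scans, list.insert with a mutated
-- index, two reconstruction loops) by one recursive forward pass with 'seen' flags
-- that streams each header line straight to the output (objective: alternative).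

-- ===== PORT A =====
def add_length_and_cache_to_header (response : String) (in_cache : Bool) : String :=
  -- response.split("\r\n"); the separator is non-empty so split? is always `some`
  let rs := (PySem.Str.split? response "\r\n").getD []
  match PySem.List.index? rs "" with
  | none => ""    -- Python raises ValueError here; excluded by Pre_
  | some l0 =>
    let step1 : List String × Nat :=
      if !(rs.take l0).any (fun line => PySem.Str.isIn "Content-Length" line) then
        let cl : Int := (PySem.List.pyRange ((l0 : Int) + 1) (PySem.List.len rs)).foldl
            (fun acc i => acc + PySem.Str.len (PySem.List.pyGetD rs i "")) 0
        (PySem.List.insert rs (l0 : Int) ("Content-Length: " ++ PySem.Int.toStr cl), l0 + 1)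
      else (rs, l0)
    let rs1 := step1.1
    let l1 := step1.2
    let step2 : List String × Nat :=
      if !(rs1.take l1).any (fun line => PySem.Str.isIn "Connection: close" line) then
        (PySem.List.insert rs1 (l1 : Int) "Connection: close", l1 + 1)
      else (rs1, l1)
    let rs2 := step2.1
    let l2 := step2.2
    let rs3 := PySem.List.insert rs2 (l2 : Int) (if in_cache then "Cache-Hit: 1" else "Cache-Hit: 0")
    -- reconstruction: headers (each + "\r\n"), blank line, body concatenated
    let hdr := (rs3.take (l2 + 1)).foldl (fun acc line => acc ++ line ++ "\r\n") ""
    (rs3.drop (l2 + 1)).foldl (fun acc line => acc ++ line) (hdr ++ "\r\n")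

-- ===== PORT B =====
-- B's inner recursive emit(parts, seen_cl, seen_conn)
def pvEmit (in_cache : Bool) : List String → Bool → Bool → String
  | [], _, _ => ""    -- parts[0] on an empty list raises IndexError in Python; excluded by Pre_
  | line :: rest, seen_cl, seen_conn =>
    if line == "" then
      let body := PySem.Str.join "" rest
      let tail0 : String := ""
      let tail1 := if !seen_cl then tail0 ++ ("Content-Length: " ++ PySem.Int.toStr (PySem.Str.len body) ++ "\r\n") else tail0
      let tail2 := if !seen_conn then tail1 ++ "Connection: close\r\n" else tail1
      let tail3 := tail2 ++ ((if in_cache then "Cache-Hit: 1" else "Cache-Hit: 0") ++ "\r\n")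
      tail3 ++ "\r\n" ++ body
    else
      line ++ "\r\n" ++ pvEmit in_cache rest
        (seen_cl || PySem.Str.isIn "Content-Length" line)
        (seen_conn || PySem.Str.isIn "Connection: close" line)

def add_length_and_cache_to_header_alt (response : String) (in_cache : Bool) : String :=
  pvEmit in_cache ((PySem.Str.split? response "\r\n").getD []) false false

-- ===== PRECONDITION & SPEC =====
-- Pre_ excludes exactly the inputs with no empty line among the "\r\n"-split parts,
-- on which A raises ValueError (B raises IndexError there).
def Pre_add_length_and_cache_to_header (response : String) (in_cache : Bool) : Prop :=
  "" ∈ (PySem.Str.split? response "\r\n").getD []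
instance (response : String) (in_cache : Bool) : Decidable (Pre_add_length_and_cache_to_header response in_cache) := by unfold Pre_add_length_and_cache_to_header; infer_instance

def pvWitness_add_length_and_cache_to_header : String × Bool :=
  ("HTTP/1.1 200 OK\r\nContent-Type: text/html\r\n\r\nhello", true)

def Spec_add_length_and_cache_to_header (response : String) (in_cache : Bool) (out : String) : Prop := out = add_length_and_cache_to_header_alt response in_cache
instance (response : String) (in_cache : Bool) (out : String) : Decidable (Spec_add_length_and_cache_to_header response in_cache out) := by unfold Spec_add_length_and_cache_to_header; infer_instance

-- ===== CLAIM (what is proved, stated in full; the proofs are below) =====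
def Claim_equal_add_length_and_cache_to_header : Prop := ∀ (response : String) (in_cache : Bool), Dom_add_length_and_cache_to_header response in_cache → Pre_add_length_and_cache_to_header response in_cache → Spec_add_length_and_cache_to_header response in_cache (add_length_and_cache_to_header response in_cache)

-- ===== LEMMAS AND PROOFS =====

-- proof-only abbreviations
def pvF (l : String) : Bool := PySem.Str.isIn "Content-Length" l
def pvG (l : String) : Bool := PySem.Str.isIn "Connection: close" l
-- the header lines both programs add, as a function of the two 'already present' facts
def pvAdds (a b : Bool) (n : Int) : List String :=
  (if a then [] else ["Content-Length: " ++ PySem.Int.toStr n]) ++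
  (if b then [] else ["Connection: close"])
-- the common normal form: headers joined by CRLF, blank line, body without separators
def pvJoinForm (P suf : List String) (c : String) : String :=
  PySem.Str.join "\r\n" (P ++ [c]) ++ "\r\n\r\n" ++ PySem.Str.join "" suf

theorem toList_empty : ("" : String).toList = [] := rfl
theorem toList_crlf : ("\r\n" : String).toList = ['\r', '\n'] := rfl
theorem toList_crlfcrlf : ("\r\n\r\n" : String).toList = ['\r', '\n', '\r', '\n'] := rfl

-- folding `acc += line` over strings, seen on the character level
theorem foldl_append_toList (l : List String) (init : String) :
    (l.foldl (fun a s => a ++ s) init).toList = init.toList ++ (l.map String.toList).flatten := by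
  induction l generalizing init with
  | nil => simp
  | cons x t ih => simp [ih, String.toList_append]

-- folding `acc += line + "\r\n"` over strings, seen on the character level
theorem foldl_append_crlf_toList (l : List String) (init : String) :
    (l.foldl (fun a s => a ++ s ++ "\r\n") init).toList
      = init.toList ++ (l.map (fun s => s.toList ++ ['\r', '\n'])).flatten := by
  induction l generalizing init with
  | nil => simp
  | cons x t ih => simp [ih, String.toList_append, toList_crlf]

-- "".join on the character level is flatten
theorem join_nil_sep (l : List (List Char)) : PySem.Chars.join [] l = l.flatten := by
  induction l with
  | nil => simp [PySem.Chars.join_nil]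
  | cons x t ih =>
    cases t with
    | nil => simp [PySem.Chars.join_singleton]
    | cons y u => simp [PySem.Chars.join_cons_cons, ih]

-- appending "\r\n" to every line of a nonempty list = "\r\n".join + one trailing "\r\n"
theorem flatten_map_toList_crlf (l : List String) (h : l ≠ []) :
    (l.map (fun s => s.toList ++ ['\r', '\n'])).flatten
      = PySem.Chars.join ['\r', '\n'] (l.map String.toList) ++ ['\r', '\n'] := by
  induction l with
  | nil => exact absurd rfl h
  | cons x t ih =>
    cases t with
    | nil => simp [PySem.Chars.join_singleton]
    | cons y u =>
      simp only [List.map_cons, List.flatten_cons, PySem.Chars.join_cons_cons, List.map_cons] at ih ⊢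
      rw [ih (by simp)]
      simp

-- A's reconstruction loop over `P ++ cacheLine :: "" :: suf` equals the join normal form
theorem reconstruct (P suf : List String) (c : String) (n : Nat) (hn : n = P.length) :
    ((PySem.List.insert (P ++ "" :: suf) ((n : Int)) c).drop (n + 1)).foldl
        (fun a s => a ++ s)
        ((((PySem.List.insert (P ++ "" :: suf) ((n : Int)) c).take (n + 1)).foldl
            (fun a s => a ++ s ++ "\r\n") "") ++ "\r\n")
      = pvJoinForm P suf c := by
  subst hn
  have hins : PySem.List.insert (P ++ "" :: suf) ((P.length : Int)) c = P ++ c :: "" :: suf := by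
    rw [PySem.List.insert_natCast _ _ _ (by simp)]
    simp
  have htake : (P ++ c :: "" :: suf).take (P.length + 1) = P ++ [c] := by
    rw [List.take_length_add_append]
    simp
  have hdrop : (P ++ c :: "" :: suf).drop (P.length + 1) = "" :: suf := by
    rw [List.drop_length_add_append]
    simp
  rw [hins, htake, hdrop]
  apply String.toList_injective
  rw [foldl_append_toList]
  simp only [pvJoinForm, String.toList_append]
  rw [foldl_append_crlf_toList]
  simp only [PySem.Str.toList_join, toList_empty, toList_crlf,
    toList_crlfcrlf, List.nil_append, List.map_cons, List.flatten_cons]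
  rw [join_nil_sep, flatten_map_toList_crlf (P ++ [c]) (by simp)]
  simp

-- the sum of the Python lengths of the body lines, as a cast Nat
theorem sum_len_cast (suf : List String) :
    (suf.map PySem.Str.len).sum = (((suf.map (fun s => s.toList.length)).sum : Nat) : Int) := by
  induction suf with
  | nil => simp
  | cons x t ih => simp [ih, PySem.Str.len_eq]

-- len("".join(body)) = sum of the line lengths
theorem len_join_nil (suf : List String) :
    PySem.Str.len (PySem.Str.join "" suf) = (suf.map PySem.Str.len).sum := by
  rw [sum_len_cast]
  have : (PySem.Str.join "" suf).toList = (suf.map String.toList).flatten := by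
    rw [PySem.Str.toList_join, toList_empty, join_nil_sep]
  simp [PySem.Str.len_eq, this, List.length_flatten, List.map_map,
    Function.comp_def]

-- "Connection: close" never occurs inside the generated Content-Length line
theorem conn_not_in_cl (n : Int) (hn : 0 ≤ n) :
    PySem.Str.isIn "Connection: close" ("Content-Length: " ++ PySem.Int.toStr n) = false := by
  cases hI : PySem.Str.isIn "Connection: close" ("Content-Length: " ++ PySem.Int.toStr n) with
  | false => rfl
  | true =>
    exfalso
    have hinf := (PySem.Str.isIn_iff_infix _ _).mp hI
    have hi : ('i' : Char) ∈ ("Connection: close" : String).toList := by decide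
    have hmem : ('i' : Char) ∈ ("Content-Length: " ++ PySem.Int.toStr n : String).toList :=
      hinf.subset hi
    rw [String.toList_append, PySem.Int.toList_toStr, PySem.Int.toChars, if_neg (not_lt.mpr hn)] at hmem
    rcases List.mem_append.mp hmem with h | h
    · exact absurd h (by decide)
    · have := Nat.isDigit_of_mem_toDigits (by norm_num) (by norm_num) h
      simp [Char.isDigit] at this

-- B's recursion streams the header lines and accumulates the two flags
theorem emit_over_pre (ic : Bool) (pre suf : List String) (cl conn : Bool) (hn : "" ∉ pre) :
    pvEmit ic (pre ++ "" :: suf) cl conn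
      = pre.foldr (fun l acc => l ++ "\r\n" ++ acc)
          (pvEmit ic ("" :: suf) (cl || pre.any pvF) (conn || pre.any pvG)) := by
  induction pre generalizing cl conn with
  | nil => simp
  | cons x t ih =>
    have hx : (x == "") = false := by
      simp only [beq_eq_false_iff_ne, ne_eq]
      exact fun h => hn (by simp [h])
    have hstep : pvEmit ic ((x :: t) ++ "" :: suf) cl conn
        = x ++ "\r\n" ++ pvEmit ic (t ++ "" :: suf) (cl || pvF x) (conn || pvG x) := by
      simp only [List.cons_append, pvEmit, hx, Bool.false_eq_true, if_false, pvF, pvG]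
    rw [hstep, ih _ _ (fun h => hn (List.mem_cons_of_mem _ h)), List.foldr_cons]
    simp [List.any_cons, pvF, pvG, Bool.or_assoc]

-- a right fold of `line + "\r\n" + acc`, on the character level
theorem foldr_crlf_toList (pre : List String) (init : String) :
    (pre.foldr (fun l acc => l ++ "\r\n" ++ acc) init).toList
      = (pre.map (fun s => s.toList ++ ['\r', '\n'])).flatten ++ init.toList := by
  induction pre with
  | nil => simp
  | cons x t ih => simp [ih, String.toList_append, toList_crlf]

-- the join normal form, on the character level
theorem joinForm_toList (P suf : List String) (c : String) :
    (pvJoinForm P suf c).toList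
      = ((P ++ [c]).map (fun s => s.toList ++ ['\r', '\n'])).flatten
          ++ ['\r', '\n'] ++ (suf.map String.toList).flatten := by
  simp only [pvJoinForm, String.toList_append, PySem.Str.toList_join, toList_empty,
    toList_crlf, toList_crlfcrlf]
  rw [join_nil_sep, flatten_map_toList_crlf (P ++ [c]) (by simp)]
  simp

-- B's port equals the join normal form with the added headers decided by the two flags
theorem alt_joinForm (ic : Bool) (pre suf : List String) (hn : "" ∉ pre) :
    pvEmit ic (pre ++ "" :: suf) false false
      = pvJoinForm (pre ++ pvAdds (pre.any pvF) (pre.any pvG) ((suf.map PySem.Str.len).sum))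
          suf (if ic then "Cache-Hit: 1" else "Cache-Hit: 0") := by
  rw [emit_over_pre ic pre suf false false hn]
  simp only [Bool.false_or]
  apply String.toList_injective
  rw [foldr_crlf_toList, joinForm_toList]
  simp only [List.append_assoc, List.map_append, List.flatten_append]
  congr 1
  -- remaining: the base case of the recursion = added headers + cache line + blank + body
  simp only [pvEmit, beq_self_eq_true, if_true, len_join_nil]
  have hbody : (PySem.Str.join "" suf).toList = (suf.map String.toList).flatten := by
    rw [PySem.Str.toList_join, toList_empty, join_nil_sep]
  cases ha : pre.any pvF <;> cases hb : pre.any pvG <;>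
    cases ic <;>
      simp [pvAdds, String.toList_append, toList_crlf, hbody]

-- ===== VERDICT (by name: the statement is the Claim_ definition above) =====
theorem add_length_and_cache_to_header_spec : Claim_equal_add_length_and_cache_to_header := by
  intro response in_cache _hdom hpre
  unfold Spec_add_length_and_cache_to_header
  unfold add_length_and_cache_to_header add_length_and_cache_to_header_alt
  unfold Pre_add_length_and_cache_to_header at hpre
  revert hpre
  generalize (PySem.Str.split? response "\r\n").getD [] = rs
  intro hpre
  obtain ⟨k, hk⟩ := Option.isSome_iff_exists.mp ((PySem.List.index?_isSome_iff rs "").mpr hpre)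
  obtain ⟨pre, suf, hsplit, hlen, hnotin⟩ := (PySem.List.index?_eq_some_iff rs "" k).mp hk
  subst hsplit
  subst hlen
  have htakek : (pre ++ "" :: suf).take pre.length = pre := by simp
  have hdropk : (pre ++ "" :: suf).drop pre.length = "" :: suf := by simp
  have hdropk1 : (pre ++ "" :: suf).drop (pre.length + 1) = suf := by
    rw [List.drop_length_add_append]
    rfl
  have hsum0 : (0 : Int) ≤ (suf.map PySem.Str.len).sum := by
    rw [sum_len_cast]; positivity
  -- the content length A computes = the sum of the body-line lengths
  have hcl : (PySem.List.pyRange ((pre.length : Int) + 1) (PySem.List.len (pre ++ "" :: suf))).foldl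
      (fun acc i => acc + PySem.Str.len (PySem.List.pyGetD (pre ++ "" :: suf) i "")) 0
      = (((pre ++ "" :: suf).drop (pre.length + 1)).map PySem.Str.len).sum := by
    rw [show ((pre.length : Int) + 1) = (((pre.length + 1 : Nat)) : Int) by push_cast; ring]
    rw [PySem.List.foldl_pyRange_pyGetD (pre ++ "" :: suf) "" (fun acc x => acc + PySem.Str.len x) 0 (by positivity)]
    rw [PySem.List.foldl_add]
    simp
  rw [alt_joinForm in_cache pre suf hnotin]
  simp only [hk, htakek]
  by_cases h1 : (pre.any fun line => PySem.Str.isIn "Content-Length" line) = true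
  · -- Content-Length already present
    simp only [h1, Bool.not_true, Bool.false_eq_true, if_false, htakek]
    rw [show pre.any pvF = true from h1]
    by_cases h2 : (pre.any fun line => PySem.Str.isIn "Connection: close" line) = true
    · simp only [h2, Bool.not_true, Bool.false_eq_true, if_false]
      rw [show pre.any pvG = true from h2]
      simpa [pvAdds] using reconstruct pre suf _ _ rfl
    · simp only [eq_false_of_ne_true h2, Bool.not_false, ite_true]
      rw [show pre.any pvG = false from eq_false_of_ne_true h2]
      have hins : PySem.List.insert (pre ++ "" :: suf) ((pre.length : Int)) "Connection: close"
          = (pre ++ ["Connection: close"]) ++ "" :: suf := by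
        rw [PySem.List.insert_natCast _ _ _ (by simp), htakek, hdropk]
        simp
      rw [hins]
      simpa [pvAdds] using reconstruct (pre ++ ["Connection: close"]) suf _ _ (by simp)
  · -- Content-Length added
    simp only [eq_false_of_ne_true h1, Bool.not_false, ite_true, hcl, hdropk1]
    rw [show pre.any pvF = false from eq_false_of_ne_true h1]
    have hins : PySem.List.insert (pre ++ "" :: suf) ((pre.length : Int))
          ("Content-Length: " ++ PySem.Int.toStr ((suf.map PySem.Str.len).sum))
        = (pre ++ ["Content-Length: " ++ PySem.Int.toStr ((suf.map PySem.Str.len).sum)]) ++ "" :: suf := by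
      rw [PySem.List.insert_natCast _ _ _ (by simp), htakek, hdropk]
      simp
    rw [hins]
    have htake1 : ((pre ++ ["Content-Length: " ++ PySem.Int.toStr ((suf.map PySem.Str.len).sum)]) ++ "" :: suf).take (pre.length + 1)
        = pre ++ ["Content-Length: " ++ PySem.Int.toStr ((suf.map PySem.Str.len).sum)] := by
      rw [List.append_assoc, List.take_length_add_append]
      simp
    rw [htake1]
    have hany1 : ((pre ++ ["Content-Length: " ++ PySem.Int.toStr ((suf.map PySem.Str.len).sum)]).any
        fun line => PySem.Str.isIn "Connection: close" line) = pre.any pvG := by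
      rw [List.any_append]
      simp only [List.any_cons, List.any_nil, Bool.or_false, conn_not_in_cl _ hsum0]
      rfl
    rw [hany1]
    by_cases h2 : pre.any pvG = true
    · simp only [h2, Bool.not_true, Bool.false_eq_true, if_false]
      simpa [pvAdds] using
        reconstruct (pre ++ ["Content-Length: " ++ PySem.Int.toStr ((suf.map PySem.Str.len).sum)]) suf _ _ (by simp)
    · simp only [eq_false_of_ne_true h2, Bool.not_false, ite_true]
      have hins2 : PySem.List.insert ((pre ++ ["Content-Length: " ++ PySem.Int.toStr ((suf.map PySem.Str.len).sum)]) ++ "" :: suf)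
            (((pre.length + 1 : Nat) : Int)) "Connection: close"
          = ((pre ++ ["Content-Length: " ++ PySem.Int.toStr ((suf.map PySem.Str.len).sum)]) ++ ["Connection: close"]) ++ "" :: suf := by
        rw [PySem.List.insert_natCast _ _ _ (by simp)]
        rw [show pre.length + 1 = (pre ++ ["Content-Length: " ++ PySem.Int.toStr ((suf.map PySem.Str.len).sum)]).length by simp]
        rw [List.take_left, List.drop_left]
        simp
      rw [hins2]
      have := reconstruct ((pre ++ ["Content-Length: " ++ PySem.Int.toStr ((suf.map PySem.Str.len).sum)]) ++ ["Connection: close"]) suf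
        (if in_cache then "Cache-Hit: 1" else "Cache-Hit: 0") (pre.length + 1 + 1) (by simp)
      rw [this]
      simp [pvAdds]
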